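-- pv_equiv track=rewrite | github.com/Rcasanova25/AI-Adoption-Dashboard | data/loaders/mckinsey.py | _categorize_barrier
-- ===== SOURCE A (Python) =====
-- def _categorize_barrier(barrier: str) -> str:
--     """Categorize implementation barrier."""
--     barrier_lower = barrier.lower()
--
--     if any(term in barrier_lower for term in ["talent", "skill", "expertise", "training"]):
--         return "talent"
--     elif any(term in barrier_lower for term in ["data", "quality", "availability"]):
--         return "data"
--     elif any(term in barrier_lower for term in ["integration", "legacy", "system"]):
--         return "technology"
--     elif any(term in barrier_lower for term in ["cost", "budget", "investment", "roi"]):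
--         return "financial"
--     elif any(
--         term in barrier_lower for term in ["security", "privacy", "compliance", "regulation"]
--     ):
--         return "security_compliance"
--     elif any(term in barrier_lower for term in ["culture", "resistance", "change"]):
--         return "organizational"
--     else:
--         return "other"
-- ===== SOURCE B (Python) =====
-- # Min-reduction rewrite: a flat keyword -> priority dict (listed in REVERSE
-- # category order to show order does not matter); the answer is the minimum
-- # priority among all matching keywords, then a label-table lookup.
-- _PRIORITY = {
--     "culture": 5, "resistance": 5, "change": 5,
--     "security": 4, "privacy": 4, "compliance": 4, "regulation": 4,
--     "cost": 3, "budget": 3, "investment": 3, "roi": 3,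
--     "integration": 2, "legacy": 2, "system": 2,
--     "data": 1, "quality": 1, "availability": 1,
--     "talent": 0, "skill": 0, "expertise": 0, "training": 0,
-- }
-- _LABELS = ["talent", "data", "technology", "financial",
--            "security_compliance", "organizational", "other"]
--
--
-- def _categorize_barrier(barrier: str) -> str:
--     barrier_lower = barrier.lower()
--     best = min((p for t, p in _PRIORITY.items() if t in barrier_lower), default=6)
--     return _LABELS[best]
-- ===== Notes on version B (the rewrite author's own statement) =====
-- stated objective: alternative
-- what changed: Replaces the priority-ordered elif chain (first-match, early exit) with an order-independent min-reduction: a flat keyword-to-priority dict (listed in reverse category order) is scanned once, the minimum priority among all matching keywords is taken, and the label is read off an indexed label table.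
import Mathlib
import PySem

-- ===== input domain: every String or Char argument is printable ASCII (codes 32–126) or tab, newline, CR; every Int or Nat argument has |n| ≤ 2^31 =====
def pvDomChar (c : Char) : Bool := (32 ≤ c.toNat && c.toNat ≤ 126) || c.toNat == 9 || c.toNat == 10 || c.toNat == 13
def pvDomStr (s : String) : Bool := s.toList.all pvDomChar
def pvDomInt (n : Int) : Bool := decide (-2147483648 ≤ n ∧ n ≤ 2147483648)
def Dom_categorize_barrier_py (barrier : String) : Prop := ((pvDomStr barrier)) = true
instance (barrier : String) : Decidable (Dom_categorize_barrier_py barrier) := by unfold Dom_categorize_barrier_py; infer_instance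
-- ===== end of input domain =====

-- B replaces A's priority-ordered elif chain by an order-independent
-- min-reduction over a flat keyword->priority table plus a label lookup
-- ("alternative": same cost, different algorithm).


-- ===== PORT A =====
def categorize_barrier_py (barrier : String) : String :=
  let barrier_lower := PySem.Str.lower barrier
  if (["talent", "skill", "expertise", "training"].any
      (fun term => PySem.Str.isIn term barrier_lower)) then "talent"
  else if (["data", "quality", "availability"].any
      (fun term => PySem.Str.isIn term barrier_lower)) then "data"
  else if (["integration", "legacy", "system"].any
      (fun term => PySem.Str.isIn term barrier_lower)) then "technology"
  else if (["cost", "budget", "investment", "roi"].any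
      (fun term => PySem.Str.isIn term barrier_lower)) then "financial"
  else if (["security", "privacy", "compliance", "regulation"].any
      (fun term => PySem.Str.isIn term barrier_lower)) then "security_compliance"
  else if (["culture", "resistance", "change"].any
      (fun term => PySem.Str.isIn term barrier_lower)) then "organizational"
  else "other"

-- ===== PORT B =====
-- one group of Source B's _PRIORITY dict: each term paired with its priority
def pvGrp (p : Int) (ts : List String) : List (String × Int) :=
  ts.map (fun t => (t, p))

-- Source B's _PRIORITY dict as an association list (same insertion order)
def pvPriority : List (String × Int) :=
  pvGrp 5 ["culture", "resistance", "change"] ++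
  pvGrp 4 ["security", "privacy", "compliance", "regulation"] ++
  pvGrp 3 ["cost", "budget", "investment", "roi"] ++
  pvGrp 2 ["integration", "legacy", "system"] ++
  pvGrp 1 ["data", "quality", "availability"] ++
  pvGrp 0 ["talent", "skill", "expertise", "training"]

def pvLabels : List String :=
  ["talent", "data", "technology", "financial",
   "security_compliance", "organizational", "other"]

def categorize_barrier_py_alt (barrier : String) : String :=
  let barrier_lower := PySem.Str.lower barrier
  -- min((p for t, p in _PRIORITY.items() if t in barrier_lower), default=6)
  let best := pvPriority.foldl
    (fun acc tp => if PySem.Str.isIn tp.1 barrier_lower then min acc tp.2 else acc) 6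
  -- _LABELS[best]; best is always in range 0..6, so the pyGet? never misses
  ((PySem.List.pyGet? pvLabels best).getD "")

-- ===== PRECONDITION & SPEC =====
def Spec_categorize_barrier_py (barrier : String) (out : String) : Prop := out = categorize_barrier_py_alt barrier
instance (barrier : String) (out : String) : Decidable (Spec_categorize_barrier_py barrier out) := by unfold Spec_categorize_barrier_py; infer_instance

-- ===== CLAIM (what is proved, stated in full; the proofs are below) =====
def Claim_equal_categorize_barrier_py : Prop := ∀ (barrier : String), Dom_categorize_barrier_py barrier → Spec_categorize_barrier_py barrier (categorize_barrier_py barrier)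

-- ===== LEMMAS AND PROOFS =====

lemma pvGrp_cons (p : Int) (t : String) (ts : List String) :
    pvGrp p (t :: ts) = (t, p) :: pvGrp p ts := rfl

-- folding min over one keyword group equals a single conditional min
lemma pv_fold_grp (s : String) (m p : Int) (ts : List String) (rest : List (String × Int)) :
    List.foldl (fun acc tp => if PySem.Str.isIn tp.1 s then min acc tp.2 else acc)
      m (pvGrp p ts ++ rest)
    = List.foldl (fun acc tp => if PySem.Str.isIn tp.1 s then min acc tp.2 else acc)
      (if ts.any (fun t => PySem.Str.isIn t s) then min m p else m) rest := by
  induction ts generalizing m with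
  | nil => simp [pvGrp]
  | cons t ts ih =>
    rw [pvGrp_cons]
    simp only [List.cons_append, List.foldl_cons, List.any_cons]
    by_cases h : PySem.Str.isIn t s = true
    · simp only [h, if_true, Bool.true_or]
      rw [ih (min m p)]
      congr 1
      split_ifs with hy
      · rw [min_assoc, min_self]
      · rfl
    · simp only [eq_false_of_ne_true h, Bool.false_or]
      exact ih m

lemma pv_fold_grp_nil (s : String) (m p : Int) (ts : List String) :
    List.foldl (fun acc tp => if PySem.Str.isIn tp.1 s then min acc tp.2 else acc)
      m (pvGrp p ts)
    = (if ts.any (fun t => PySem.Str.isIn t s) then min m p else m) := by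
  have := pv_fold_grp s m p ts []
  simpa using this

-- ===== VERDICT (by name: the statement is the Claim_ definition above) =====
theorem categorize_barrier_py_spec : Claim_equal_categorize_barrier_py := by
  intro barrier _
  unfold Spec_categorize_barrier_py categorize_barrier_py categorize_barrier_py_alt pvPriority
  simp only [List.append_assoc, pv_fold_grp, pv_fold_grp_nil]
  cases h1 : (["talent", "skill", "expertise", "training"].any
      (fun term => PySem.Str.isIn term (PySem.Str.lower barrier))) <;>
  cases h2 : (["data", "quality", "availability"].any
      (fun term => PySem.Str.isIn term (PySem.Str.lower barrier))) <;>
  cases h3 : (["integration", "legacy", "system"].any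
      (fun term => PySem.Str.isIn term (PySem.Str.lower barrier))) <;>
  cases h4 : (["cost", "budget", "investment", "roi"].any
      (fun term => PySem.Str.isIn term (PySem.Str.lower barrier))) <;>
  cases h5 : (["security", "privacy", "compliance", "regulation"].any
      (fun term => PySem.Str.isIn term (PySem.Str.lower barrier))) <;>
  cases h6 : (["culture", "resistance", "change"].any
      (fun term => PySem.Str.isIn term (PySem.Str.lower barrier))) <;>
  rfl
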